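-- pv_equiv track=rewrite | github.com/soyukke/lean-unsolved | scripts/exploration_ck_closedform.py | compute_v2_sequence
-- ===== SOURCE A (Python) =====
-- def v2(n):
--     """2-adic valuation"""
--     if n == 0:
--         return 0
--     count = 0
--     while n % 2 == 0:
--         n //= 2
--         count += 1
--     return count
--
-- def syracuse(n):
--     """Syracuse function"""
--     m = 3 * n + 1
--     return m >> v2(m)
--
-- def compute_v2_sequence(n, k):
--     """Compute v2 sequence (v_1, ..., v_k)"""
--     vs = []
--     cur = n
--     for _ in range(k):
--         v = v2(3 * cur + 1)
--         vs.append(v)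
--         cur = syracuse(cur)
--     return vs
-- ===== SOURCE B (Python) =====
-- def compute_v2_sequence(n, k):
--     """Compute v2 sequence (v_1, ..., v_k)"""
--     vs = []
--     cur = n
--     for _ in range(k):
--         m = 3 * cur + 1
--         low = m & -m          # lowest set bit of m (m is never 0: m == 1 mod 3)
--         vs.append(low.bit_length() - 1)
--         cur = m // low
--     return vs
-- ===== Notes on version B (the rewrite author's own statement) =====
-- stated objective: faster
-- what changed: B replaces A's repeated-division while-loop for the 2-adic valuation by the closed-form lowest-set-bit computation low = m & -m (v = low.bit_length()-1, cur = m // low), computed once per step instead of twice (A recomputes v2 inside syracuse).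
import Mathlib
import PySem

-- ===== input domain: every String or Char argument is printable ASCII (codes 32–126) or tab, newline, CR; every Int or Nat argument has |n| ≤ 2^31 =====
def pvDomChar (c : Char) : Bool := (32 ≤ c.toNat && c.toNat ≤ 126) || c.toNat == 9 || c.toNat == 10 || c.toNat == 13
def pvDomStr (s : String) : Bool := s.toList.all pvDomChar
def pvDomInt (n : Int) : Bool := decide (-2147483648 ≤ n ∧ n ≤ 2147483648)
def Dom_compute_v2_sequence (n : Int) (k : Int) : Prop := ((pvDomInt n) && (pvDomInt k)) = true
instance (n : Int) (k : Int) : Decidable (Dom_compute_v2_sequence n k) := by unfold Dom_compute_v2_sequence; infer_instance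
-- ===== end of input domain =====

-- B replaces A's repeated-division while-loop for the 2-adic valuation by the closed-form
-- bit computation low = m & -m (v = low.bit_length()-1, cur = m // low), computed once per step.

-- ===== PORT A =====
-- while n % 2 == 0: n //= 2; count += 1   — the 'n ≠ 0' conjunct only totalizes the
-- recursion (Python reaches the loop only with n ≠ 0, where it terminates).
def v2Loop (n : Int) (count : Int) : Int :=
  if n ≠ 0 ∧ PySem.Int.mod n 2 = 0 then
    v2Loop (PySem.Int.floordiv n 2) (count + 1)
  else count
termination_by n.natAbs
decreasing_by
  rename_i h
  obtain ⟨h0, h2⟩ := h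
  obtain ⟨m, hm⟩ := (PySem.Int.mod_eq_zero_iff_dvd n 2).mp h2
  subst hm
  simp [PySem.Int.floordiv, Int.mul_fdiv_cancel_left _ (by norm_num : (2:Int) ≠ 0),
        Int.natAbs_mul]
  omega

def v2 (n : Int) : Int :=
  if n = 0 then 0 else v2Loop n 0

-- m >> v2(m) : Python's '>>' is Lean's '>>>' on Int×Nat; v2 ≥ 0 so .toNat is exact
def syracuse (n : Int) : Int :=
  let m := 3 * n + 1
  m >>> (v2 m).toNat

def compute_v2_sequence (n : Int) (k : Int) : List Int :=
  let r := (PySem.List.pyRange 0 k 1).foldl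
    (fun (st : List Int × Int) _ =>
      let v := v2 (3 * st.2 + 1)
      (st.1 ++ [v], syracuse st.2))
    ([], n)
  r.1

-- ===== PORT B =====
def compute_v2_sequence_alt (n : Int) (k : Int) : List Int :=
  let r := (PySem.List.pyRange 0 k 1).foldl
    (fun (st : List Int × Int) _ =>
      let m := 3 * st.2 + 1
      let low := PySem.Int.band m (-m)
      (st.1 ++ [(PySem.Int.bitLength low : Int) - 1], PySem.Int.floordiv m low))
    ([], n)
  r.1

-- ===== PRECONDITION & SPEC =====
def Spec_compute_v2_sequence (n : Int) (k : Int) (out : List Int) : Prop := out = compute_v2_sequence_alt n k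
instance (n : Int) (k : Int) (out : List Int) : Decidable (Spec_compute_v2_sequence n k out) := by unfold Spec_compute_v2_sequence; infer_instance

-- ===== CLAIM (what is proved, stated in full; the proofs are below) =====
def Claim_equal_compute_v2_sequence : Prop := ∀ (n : Int) (k : Int), Dom_compute_v2_sequence n k → Spec_compute_v2_sequence n k (compute_v2_sequence n k)

-- ===== LEMMAS AND PROOFS =====

/-- trailing-zero count of a natural number (0 for 0). -/
def tz (a : Nat) : Nat :=
  if h : a % 2 = 0 ∧ a ≠ 0 then tz (a / 2) + 1 else 0
termination_by a
decreasing_by omega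

theorem tz_odd {a : Nat} (h : a % 2 = 1) : tz a = 0 := by
  rw [tz, dif_neg (by omega)]

theorem tz_even {b : Nat} (h : 0 < b) : tz (2 * b) = tz b + 1 := by
  rw [tz, dif_pos (by omega), Nat.mul_div_cancel_left _ (by norm_num : 0 < 2)]

theorem two_pow_tz_dvd (a : Nat) (h : 0 < a) : 2 ^ tz a ∣ a := by
  induction a using Nat.strong_induction_on with
  | _ a ih =>
    rcases Nat.even_or_odd a with he | ho
    · obtain ⟨b, hb⟩ := he
      have hb' : a = 2 * b := by omega
      subst hb'
      have hbpos : 0 < b := by omega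
      rw [tz_even hbpos, pow_succ]
      have := ih b (by omega) hbpos
      calc 2 ^ tz b * 2 ∣ b * 2 := mul_dvd_mul_right this 2
        _ = 2 * b := by ring
    · rw [tz_odd (Nat.odd_iff.mp ho)]; simp

theorem land_pred (a : Nat) (h : 0 < a) : a &&& (a - 1) = a - 2 ^ tz a := by
  induction a using Nat.strong_induction_on with
  | _ a ih =>
    rcases Nat.even_or_odd a with he | ho
    · obtain ⟨b, hb⟩ := he
      have hb' : a = 2 * b := by omega
      subst hb'
      have hbpos : 0 < b := by omega
      have hdvd := two_pow_tz_dvd b hbpos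
      have hle : 2 ^ tz b ≤ b := Nat.le_of_dvd hbpos hdvd
      apply Nat.eq_of_testBit_eq
      intro i
      cases i with
      | zero =>
        have h1 : (2 * b).testBit 0 = false := by
          rw [Nat.testBit_zero, decide_eq_false_iff_not]; omega
        have h2 : (2 * b - 2 ^ tz (2 * b)).testBit 0 = false := by
          rw [tz_even hbpos, pow_succ]
          have : 2 * b - 2 ^ tz b * 2 = 2 * (b - 2 ^ tz b) := by omega
          rw [this, Nat.testBit_zero, decide_eq_false_iff_not]; omega
        simp [h2]
      | succ i =>
        have hsub : 2 * b - 1 = 2 * (b - 1) + 1 := by omega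
        have l1 : (2 * b).testBit (i + 1) = b.testBit i := by
          rw [Nat.testBit_succ]; congr 1; omega
        have l2 : (2 * b - 1).testBit (i + 1) = (b - 1).testBit i := by
          rw [Nat.testBit_succ]; congr 1; omega
        have l3 : (2 * b - 2 ^ tz (2 * b)).testBit (i + 1) = (b - 2 ^ tz b).testBit i := by
          rw [tz_even hbpos, pow_succ, Nat.testBit_succ]
          congr 1; omega
        rw [Nat.testBit_and, l1, l2, l3, ← ih b (by omega) hbpos, Nat.testBit_and]
    · have h1 : a % 2 = 1 := Nat.odd_iff.mp ho
      rw [tz_odd h1, pow_zero]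
      apply Nat.eq_of_testBit_eq
      intro i
      cases i with
      | zero =>
        have hb : (a - 1).testBit 0 = false := by
          rw [Nat.testBit_zero, decide_eq_false_iff_not]; omega
        rw [Nat.testBit_and, hb, Bool.and_false]
      | succ i =>
        have l1 : a.testBit (i + 1) = (a / 2).testBit i := Nat.testBit_succ ..
        have l2 : (a - 1).testBit (i + 1) = (a / 2).testBit i := by
          rw [Nat.testBit_succ]; congr 1; omega
        rw [Nat.testBit_and, l1, l2, Bool.and_self]

theorem land_lowbit (a : Nat) (h : 0 < a) : a - (a &&& (a - 1)) = 2 ^ tz a := by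
  have hle := Nat.le_of_dvd h (two_pow_tz_dvd a h)
  rw [land_pred a h]
  generalize 2 ^ tz a = p at hle ⊢
  omega

/-- `m & -m` is the lowest set bit, for either sign of `m`. -/
theorem band_neg_self (m : Int) (h : m ≠ 0) :
    PySem.Int.band m (-m) = ((2 ^ tz m.natAbs : Nat) : Int) := by
  rcases lt_trichotomy m 0 with hlt | rfl | hgt
  · have h0 : ¬ (0 : Int) ≤ m := by omega
    have h1 : (0 : Int) ≤ -m := by omega
    rw [PySem.Int.band]
    simp only [h0, h1, if_false, if_true]
    have e1 : (-m).toNat = m.natAbs := by omega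
    have e2 : (-m - 1).toNat = m.natAbs - 1 := by omega
    rw [e1, e2, land_lowbit m.natAbs (by omega)]
  · simp at h
  · have h0 : (0 : Int) ≤ m := by omega
    have h1 : ¬ (0 : Int) ≤ -m := by omega
    rw [PySem.Int.band]
    simp only [h0, h1, if_true, if_false]
    have e1 : m.toNat = m.natAbs := by omega
    have e2 : (-(-m) - 1).toNat = m.natAbs - 1 := by omega
    rw [e1, e2, land_lowbit m.natAbs (by omega)]

theorem bitLength_two_pow (t : Nat) : PySem.Int.bitLength ((2 ^ t : Nat) : Int) = t + 1 := by
  induction t with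
  | zero => decide
  | succ t ih =>
    rw [PySem.Int.bitLength_natCast (show (0:Nat) < 2 ^ (t + 1) by positivity)]
    rw [show 2 ^ (t + 1) / 2 = 2 ^ t by rw [pow_succ]; omega, ih]

theorem v2Loop_spec (a : Nat) (ha : 0 < a) :
    ∀ (n : Int), n.natAbs = a → ∀ (c : Int), v2Loop n c = c + (tz a : Int) := by
  induction a using Nat.strong_induction_on with
  | _ a ih =>
    intro n hn c
    have hn0 : n ≠ 0 := by omega
    by_cases h2 : PySem.Int.mod n 2 = 0
    · obtain ⟨m, hm⟩ := (PySem.Int.mod_eq_zero_iff_dvd n 2).mp h2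
      subst hm
      have hfd : PySem.Int.floordiv (2 * m) 2 = m := by
        simp [PySem.Int.floordiv, Int.mul_fdiv_cancel_left _ (by norm_num : (2:Int) ≠ 0)]
      have hna : (2 * m).natAbs = 2 * m.natAbs := by
        simp [Int.natAbs_mul]
      have hmpos : 0 < m.natAbs := by omega
      rw [v2Loop]
      simp only [hn0, h2, ne_eq, not_false_eq_true, and_self, if_true, hfd]
      rw [ih m.natAbs (by omega) hmpos m rfl (c + 1)]
      rw [← hn, hna, tz_even hmpos]
      push_cast
      ring
    · rw [v2Loop]
      simp only [hn0, h2, ne_eq, not_false_eq_true, true_and, if_false]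
      have hodd : a % 2 = 1 := by
        rcases Nat.even_or_odd a with he | ho
        · exfalso
          apply h2
          rw [PySem.Int.mod_eq_zero_iff_dvd]
          have : (2 : Nat) ∣ n.natAbs := by rw [hn]; exact he.two_dvd
          exact Int.natAbs_dvd_natAbs.mp (by simpa using this)
        · exact Nat.odd_iff.mp ho
      rw [tz_odd hodd]
      simp

theorem v2_spec (n : Int) (h : n ≠ 0) : v2 n = (tz n.natAbs : Int) := by
  rw [v2, if_neg h, v2Loop_spec n.natAbs (by omega) n rfl 0]
  ring

theorem shiftRight_eq_fdiv (m : Int) (t : Nat) : m >>> t = Int.fdiv m ((2 ^ t : Nat) : Int) := by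
  have hp : (0 : Int) < ((2 ^ t : Nat) : Int) := by positivity
  have hfl : ∀ x : Int, Int.fdiv x ((2 ^ t : Nat) : Int) = PySem.Int.floordiv x ((2 ^ t : Nat) : Int) := fun _ => rfl
  cases m with
  | ofNat a =>
    have hd : 2 ^ t * (a / 2 ^ t) + a % 2 ^ t = a := Nat.div_add_mod a (2 ^ t)
    have hdi : ((2 ^ t : Nat) : Int) * ((a / 2 ^ t : Nat) : Int) + ((a % 2 ^ t : Nat) : Int) = (a : Int) := by
      exact_mod_cast hd
    have hmi : ((a % 2 ^ t : Nat) : Int) < ((2 ^ t : Nat) : Int) := by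
      exact_mod_cast Nat.mod_lt _ (Nat.two_pow_pos t)
    have hri : (0 : Int) ≤ ((a % 2 ^ t : Nat) : Int) := Int.natCast_nonneg _
    have h1 : Int.ofNat a >>> t = Int.ofNat (a / 2 ^ t) := by
      show Int.ofNat (a >>> t) = _
      rw [Nat.shiftRight_eq_div_pow]
    rw [h1, hfl]
    symm
    rw [PySem.Int.floordiv_eq_iff_of_pos hp]
    simp only [Int.ofNat_eq_natCast]
    constructor
    · nlinarith [hdi, hri]
    · nlinarith [hdi, hmi]
  | negSucc a =>
    have hd : 2 ^ t * (a / 2 ^ t) + a % 2 ^ t = a := Nat.div_add_mod a (2 ^ t)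
    have hdi : ((2 ^ t : Nat) : Int) * ((a / 2 ^ t : Nat) : Int) + ((a % 2 ^ t : Nat) : Int) = (a : Int) := by
      exact_mod_cast hd
    have hmi : ((a % 2 ^ t : Nat) : Int) < ((2 ^ t : Nat) : Int) := by
      exact_mod_cast Nat.mod_lt _ (Nat.two_pow_pos t)
    have hri : (0 : Int) ≤ ((a % 2 ^ t : Nat) : Int) := Int.natCast_nonneg _
    have h1 : Int.negSucc a >>> t = Int.negSucc (a / 2 ^ t) := by
      show Int.negSucc (a >>> t) = _
      rw [Nat.shiftRight_eq_div_pow]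
    rw [h1, hfl]
    symm
    rw [PySem.Int.floordiv_eq_iff_of_pos hp, Int.negSucc_eq, Int.negSucc_eq]
    constructor
    · nlinarith [hdi, hmi]
    · nlinarith [hdi, hri]

theorem step_eq (cur : Int) :
    (v2 (3 * cur + 1) = (PySem.Int.bitLength (PySem.Int.band (3 * cur + 1) (-(3 * cur + 1))) : Int) - 1)
    ∧ syracuse cur = PySem.Int.floordiv (3 * cur + 1) (PySem.Int.band (3 * cur + 1) (-(3 * cur + 1))) := by
  set m := 3 * cur + 1 with hm
  have hm0 : m ≠ 0 := by
    intro h; rw [hm] at h; omega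
  have hband := band_neg_self m hm0
  have hv2 := v2_spec m hm0
  constructor
  · rw [hv2, hband, bitLength_two_pow]
    push_cast; ring
  · rw [syracuse, hband, PySem.Int.floordiv]
    show m >>> (v2 m).toNat = _
    rw [hv2]
    have : ((tz m.natAbs : Int)).toNat = tz m.natAbs := by omega
    rw [this, shiftRight_eq_fdiv]

-- ===== VERDICT (by name: the statement is the Claim_ definition above) =====
theorem compute_v2_sequence_spec : Claim_equal_compute_v2_sequence := by
  intro n k _
  unfold Spec_compute_v2_sequence compute_v2_sequence compute_v2_sequence_alt
  have hfun : (fun (st : List Int × Int) (_ : Int) =>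
      let v := v2 (3 * st.2 + 1)
      (st.1 ++ [v], syracuse st.2))
    = (fun (st : List Int × Int) (_ : Int) =>
      let m := 3 * st.2 + 1
      let low := PySem.Int.band m (-m)
      (st.1 ++ [(PySem.Int.bitLength low : Int) - 1], PySem.Int.floordiv m low)) := by
    funext st x
    obtain ⟨h1, h2⟩ := step_eq st.2
    simp only [h1, h2]
  rw [hfun]
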